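-- pv_equiv track=rewrite | github.com/pq1121/algorithm | hw_2/task.py | rotate_and_reverse
-- ===== SOURCE A (Python) =====
-- def rotate_and_reverse(arr: list, k: int):
--
--     if not isinstance(k, int): raise TypeError()
--     if k < 0: raise ValueError("Число должно быть больше либо равно нулю")
--     n = len(arr)
--     result_arr = []
--
--     if k > n:
--         k = k % n
--
--     if n == k and k == 0:
--
--         for i in range(n):
--             result_arr.append(arr[i])
--
--     else:
--
--         for i in range(n-k, n, 1):
--             result_arr.append(arr[i])
--
--         for i in range(0, n-k, 1):
--             result_arr.append(arr[i])
--
--     return result_arr[::-1]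
-- ===== SOURCE B (Python) =====
-- def rotate_and_reverse(arr: list, k: int):
--     if not isinstance(k, int): raise TypeError()
--     if k < 0: raise ValueError("Число должно быть больше либо равно нулю")
--     n = len(arr)
--     if k > n:
--         k = k % n
--     return [arr[(n - 1 - k - j) % n] for j in range(n)]
-- ===== Notes on version B (the rewrite author's own statement) =====
-- stated objective: simpler
-- what changed: Replaces A's rotate-then-reverse construction (two index loops appending into a list, then a reversing slice) with a single comprehension that computes each output element directly via the closed-form source index arr[(n-1-k-j) % n].
import Mathlib
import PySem

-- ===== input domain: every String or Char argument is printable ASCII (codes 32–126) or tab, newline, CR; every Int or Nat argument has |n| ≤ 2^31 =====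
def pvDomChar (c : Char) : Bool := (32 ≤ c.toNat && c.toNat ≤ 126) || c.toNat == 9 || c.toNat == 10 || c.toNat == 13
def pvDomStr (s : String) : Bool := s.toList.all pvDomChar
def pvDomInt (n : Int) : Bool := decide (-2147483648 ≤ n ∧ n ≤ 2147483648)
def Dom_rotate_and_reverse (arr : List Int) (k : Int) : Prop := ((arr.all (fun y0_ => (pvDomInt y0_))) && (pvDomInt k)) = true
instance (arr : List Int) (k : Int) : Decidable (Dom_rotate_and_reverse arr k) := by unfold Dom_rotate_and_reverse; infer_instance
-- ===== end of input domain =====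

-- One honest line: B replaces A's rotate-then-reverse two-loop construction by a single
-- closed-form index map arr[(n-1-k-j) % n]; objective: simpler (one pass, no list building).

-- ===== PORT A =====
-- literal transliteration of A: two append loops building the rotated list, then [::-1]
def rotate_and_reverse (arr : List Int) (k : Int) : List Int :=
  let n : Int := arr.length
  let k := if k > n then PySem.Int.mod k n else k
  let result_arr : List Int :=
    if n == k && k == 0 then
      (PySem.List.pyRange 0 n 1).foldl
        (fun acc i => acc ++ [PySem.List.pyGetD arr i 0]) []
    else
      let r1 := (PySem.List.pyRange (n - k) n 1).foldl
        (fun acc i => acc ++ [PySem.List.pyGetD arr i 0]) []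
      (PySem.List.pyRange 0 (n - k) 1).foldl
        (fun acc i => acc ++ [PySem.List.pyGetD arr i 0]) r1
  -- result_arr[::-1]
  (PySem.List.slice? result_arr none none (-1)).getD []

-- ===== PORT B =====
-- literal transliteration of B: one comprehension with a modular source-index formula
def rotate_and_reverse_alt (arr : List Int) (k : Int) : List Int :=
  let n : Int := arr.length
  let k := if k > n then PySem.Int.mod k n else k
  (PySem.List.pyRange 0 n 1).map
    (fun j => PySem.List.pyGetD arr (PySem.Int.mod (n - 1 - k - j) n) 0)

-- ===== PRECONDITION & SPEC =====
-- Pre_ excludes exactly the inputs where Python A raises: k < 0 (ValueError) and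
-- arr = [] with k > 0 (ZeroDivisionError from k % 0); A returns on everything else.
def Pre_rotate_and_reverse (arr : List Int) (k : Int) : Prop :=
  0 ≤ k ∧ (arr = [] → k = 0)
instance (arr : List Int) (k : Int) : Decidable (Pre_rotate_and_reverse arr k) := by
  unfold Pre_rotate_and_reverse; infer_instance

def pvWitness_rotate_and_reverse : List Int × Int := ([1, 2, 3, 4], 6)

def Spec_rotate_and_reverse (arr : List Int) (k : Int) (out : List Int) : Prop :=
  out = rotate_and_reverse_alt arr k
instance (arr : List Int) (k : Int) (out : List Int) : Decidable (Spec_rotate_and_reverse arr k out) := by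
  unfold Spec_rotate_and_reverse; infer_instance

-- ===== CLAIM (what is proved, stated in full; the proofs are below) =====
def Claim_equal_rotate_and_reverse : Prop := ∀ (arr : List Int) (k : Int), Dom_rotate_and_reverse arr k → Pre_rotate_and_reverse arr k → Spec_rotate_and_reverse arr k (rotate_and_reverse arr k)

-- ===== LEMMAS AND PROOFS =====

-- a small reduced-modulus characterisation used on B's side
theorem pv_mod_small (a n : Int) (hn : 0 < n) (h1 : -n ≤ a) (h2 : a < n) :
    PySem.Int.mod a n = if a < 0 then a + n else a := by
  rw [PySem.Int.mod_eq_emod_of_pos hn]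
  split_ifs with h
  · calc a % n = (a + n * 1) % n := (Int.add_mul_emod_self_left a n 1).symm
    _ = (a + n) % n := by ring_nf
    _ = a + n := Int.emod_eq_of_lt (by omega) (by omega)
  · exact Int.emod_eq_of_lt (by omega) (by omega)

-- prefix loop: mapping pyGetD over range(0, m) is take
theorem pv_map_pyGetD_take (arr : List Int) (d m : Int) (h0 : 0 ≤ m)
    (hm : m ≤ arr.length) :
    (PySem.List.pyRange 0 m 1).map (fun j => PySem.List.pyGetD arr j d)
      = arr.take m.toNat := by
  rw [PySem.List.pyRange_one, List.map_map]
  apply List.ext_getElem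
  · simp; omega
  · intro i hi hi2
    simp only [List.getElem_map, List.getElem_range, Function.comp,
      List.getElem_take]
    have hib : i < m.toNat := by simp at hi; omega
    rw [PySem.List.pyGetD_eq_getElem arr d (by omega) (by omega)]
    congr 1
    omega

-- the core: for 0 ≤ k2 ≤ n, A's reversed rotation equals B's index-map comprehension
theorem pv_main (arr : List Int) (k2 : Int) (hn : 0 < (arr.length : Int))
    (h0 : 0 ≤ k2) (hk : k2 ≤ (arr.length : Int)) :
    (PySem.List.slice?
      (if ((arr.length : Int) == k2 && k2 == 0) = true then
        (PySem.List.pyRange 0 (arr.length : Int) 1).foldl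
          (fun acc i => acc ++ [PySem.List.pyGetD arr i 0]) []
      else
        (PySem.List.pyRange 0 ((arr.length : Int) - k2) 1).foldl
          (fun acc i => acc ++ [PySem.List.pyGetD arr i 0])
          ((PySem.List.pyRange ((arr.length : Int) - k2) (arr.length : Int) 1).foldl
            (fun acc i => acc ++ [PySem.List.pyGetD arr i 0]) []))
      none none (-1)).getD []
    = (PySem.List.pyRange 0 (arr.length : Int) 1).map
        (fun j => PySem.List.pyGetD arr
          (PySem.Int.mod ((arr.length : Int) - 1 - k2 - j) (arr.length : Int)) 0) := by
  have hbr : (((arr.length : Int) == k2) && (k2 == 0)) = false := by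
    by_cases h : k2 = 0
    · simp only [h, Bool.and_eq_false_iff, beq_eq_false_iff_ne]
      left; omega
    · simp only [Bool.and_eq_false_iff, beq_eq_false_iff_ne]
      right; exact h
  rw [hbr]
  simp only [Bool.false_eq_true, if_false]
  rw [PySem.List.slice?_none_none_neg_one, Option.getD_some]
  rw [PySem.List.foldl_append_singleton_eq_map, PySem.List.foldl_append_singleton_eq_map,
    List.nil_append]
  rw [PySem.List.map_pyGetD_pyRange' arr 0 (show (0:Int) ≤ (arr.length : Int) - k2 by omega)]
  rw [pv_map_pyGetD_take arr 0 ((arr.length : Int) - k2) (by omega) (by omega)]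
  -- now elementwise
  apply List.ext_getElem
  · simp [PySem.List.length_pyRange_one]; omega
  · intro i hi hi2
    have hin : i < arr.length := by
      simp [PySem.List.length_pyRange_one] at hi2; omega
    rw [List.getElem_map, PySem.List.getElem_pyRange_one]
    rw [show (0 : Int) + (i : Int) = (i : Int) by omega]
    rw [pv_mod_small ((arr.length : Int) - 1 - k2 - i) (arr.length : Int)
      (by omega) (by omega) (by omega)]
    rw [List.getElem_reverse]
    by_cases hcase : (i : Int) < (arr.length : Int) - k2
    · rw [if_neg (by omega)]
      rw [PySem.List.pyGetD_eq_getElem arr 0 (by omega) (by omega)]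
      rw [List.getElem_append_right (by simp; omega)]
      simp only [List.getElem_take, List.length_drop]
      congr 1
      simp; omega
    · rw [if_pos (by omega)]
      rw [PySem.List.pyGetD_eq_getElem arr 0 (by omega) (by omega)]
      rw [List.getElem_append_left (by simp; omega)]
      simp only [List.getElem_drop]
      congr 1
      simp; omega

-- ===== VERDICT (by name: the statement is the Claim_ definition above) =====
theorem rotate_and_reverse_spec : Claim_equal_rotate_and_reverse := by
  intro arr k _hdom hpre
  obtain ⟨hk0, hemp⟩ := hpre
  unfold Spec_rotate_and_reverse
  rcases eq_or_ne arr [] with hE | hE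
  · subst hE
    have : k = 0 := hemp rfl
    subst this
    decide
  · have hn : 0 < (arr.length : Int) := by
      have := List.length_pos_of_ne_nil hE; omega
    simp only [rotate_and_reverse, rotate_and_reverse_alt]
    generalize hg : (if k > (arr.length : Int) then PySem.Int.mod k (arr.length : Int) else k) = k2
    have hk2b : 0 ≤ k2 ∧ k2 ≤ (arr.length : Int) := by
      rw [← hg]; split_ifs with h
      · exact ⟨PySem.Int.mod_nonneg k hn, le_of_lt (PySem.Int.mod_lt k hn)⟩
      · omega
    exact pv_main arr k2 hn hk2b.1 hk2b.2
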